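-- pv_equiv track=rewrite | github.com/JSLEE753/algorithm | 문제/04. 옹알이 (Lv.0)/main.py | solution
-- ===== SOURCE A (Python) =====
-- def solution(babbling):
--     speakables = ['aya', 'ye', 'woo', 'ma']
--     count = 0
--
--     for word in babbling :
--         for speakable in speakables :
--             if speakable in word :
--                 word = word.replace(speakable,' ')
--         if (word.strip() == '') :
--             count += 1
--
--     return count
-- ===== SOURCE B (Python) =====
-- def solution(babbling):
--     # greedy one-pass parse per word; whitespace is skippable, matching the strip-based test
--     def speaks(word):
--         i = 0
--         n = len(word)
--         while i < n:
--             if word[i:i+3] in ('aya', 'woo'):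
--                 i += 3
--             elif word[i:i+2] in ('ye', 'ma'):
--                 i += 2
--             elif word[i].isspace():
--                 i += 1
--             else:
--                 return False
--         return True
--     return sum(1 for word in babbling if speaks(word))
-- ===== Notes on version B (the rewrite author's own statement) =====
-- stated objective: alternative
-- what changed: B replaces A's four sequential str.replace passes plus strip per word by a single greedy left-to-right parse with an index pointer that matches one token slice (or skips one whitespace char) at a time and must consume the whole word.
import Mathlib
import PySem

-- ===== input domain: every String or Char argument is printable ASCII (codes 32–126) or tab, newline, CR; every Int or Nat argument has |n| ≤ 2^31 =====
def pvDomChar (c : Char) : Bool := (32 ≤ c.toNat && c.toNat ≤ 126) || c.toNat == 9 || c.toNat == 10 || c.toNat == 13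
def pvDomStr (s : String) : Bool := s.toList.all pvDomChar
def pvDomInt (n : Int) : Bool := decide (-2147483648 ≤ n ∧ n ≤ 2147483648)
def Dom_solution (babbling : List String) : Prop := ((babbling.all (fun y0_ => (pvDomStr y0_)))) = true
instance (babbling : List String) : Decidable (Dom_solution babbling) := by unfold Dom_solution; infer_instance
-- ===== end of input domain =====

-- B re-implements the babbling count as a single greedy left-to-right parse per word (index
-- pointer matching one token slice at a time, whitespace skippable, stop at the first mismatch)
-- instead of A's replace-each-token-then-strip passes.

-- ===== PORT A =====
def solution (babbling : List String) : Int :=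
  let speakables : List String := ["aya", "ye", "woo", "ma"]
  babbling.foldl (fun count word =>
    let word := speakables.foldl (fun word speakable =>
      if PySem.Str.isIn speakable word then PySem.Str.replace word speakable " " else word) word
    if PySem.Str.strip word == "" then count + 1 else count) 0

-- ===== PORT B =====
-- the 'while i < n' loop of Source B's speaks(), with a structural fuel ≥ n - i (fuel = n at entry;
-- i advances on every iteration, so fuel 0 means i ≥ n and the loop exits with True)
def speaksGo (word : String) (n : Nat) (i : Nat) : Nat → Bool
  | 0 => true
  | fuel + 1 =>
    if i < n then
      if PySem.Str.slice word (some (i : Int)) (some ((i + 3 : Nat) : Int)) ∈ ["aya", "woo"] then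
        speaksGo word n (i + 3) fuel
      else if PySem.Str.slice word (some (i : Int)) (some ((i + 2 : Nat) : Int)) ∈ ["ye", "ma"] then
        speaksGo word n (i + 2) fuel
      else if (match PySem.Str.pyGet? word (i : Int) with
               | some c => PySem.Chars.isspace c
               | none => false) then
        speaksGo word n (i + 1) fuel
      else false
    else true

def solution_alt (babbling : List String) : Int :=
  babbling.foldl (fun acc word =>
    if speaksGo word (PySem.Str.len word).toNat 0 (PySem.Str.len word).toNat then acc + 1
    else acc) 0

-- ===== PRECONDITION & SPEC =====
def Spec_solution (babbling : List String) (out : Int) : Prop :=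
  out = solution_alt babbling
instance (babbling : List String) (out : Int) : Decidable (Spec_solution babbling out) := by
  unfold Spec_solution; infer_instance

-- ===== CLAIM (what is proved, stated in full; the proofs are below) =====
def Claim_equal_solution : Prop :=
  ∀ (babbling : List String), Dom_solution babbling → Spec_solution babbling (solution babbling)

-- ===== LEMMAS AND PROOFS =====

-- greedy tiling of a word by the four tokens and whitespace characters (the language both
-- programs accept); fuel = length of the list suffices
def isWS4 (c : Char) : Bool := c == ' ' || c == '\t' || c == '\n' || c == '\r'

def tokWSF : Nat → List Char → Bool
  | 0, s => s.isEmpty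
  | fuel + 1, s =>
    match s with
    | [] => true
    | c :: t =>
      if ['a','y','a'].isPrefixOf (c :: t) || ['w','o','o'].isPrefixOf (c :: t) then
        tokWSF fuel (t.drop 2)
      else if ['y','e'].isPrefixOf (c :: t) || ['m','a'].isPrefixOf (c :: t) then
        tokWSF fuel (t.drop 1)
      else if isWS4 c then tokWSF fuel t
      else false

def tokWS (s : List Char) : Bool := tokWSF s.length s


-- clean form of PySem.Chars.replace with a nonempty pattern and replacement " "
def rep (old : List Char) (s : List Char) : List Char :=
  match s with
  | [] => []
  | c :: t => if old.isPrefixOf (c :: t) then ' ' :: rep old (t.drop (old.length - 1))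
              else c :: rep old t
termination_by s.length
decreasing_by all_goals (simp; try omega)

theorem rep_go (old : List Char) (hold : old ≠ []) :
    ∀ (fuel : Nat) (l acc : List Char), l.length ≤ fuel →
      PySem.Chars.replace.go old [' '] fuel l acc = acc.reverse ++ rep old l := by
  intro fuel
  induction fuel with
  | zero =>
    intro l acc hl
    have : l = [] := by cases l <;> simp_all
    subst this
    simp [PySem.Chars.replace.go, rep]
  | succ fuel ih =>
    intro l acc hl
    cases l with
    | nil => simp [PySem.Chars.replace.go, rep]
    | cons c t =>
      rw [PySem.Chars.replace.go]
      by_cases hp : old.isPrefixOf (c :: t)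
      · obtain ⟨o, old', rfl⟩ : ∃ o old', old = o :: old' := by
          cases old with | nil => simp at hold | cons a b => exact ⟨a, b, rfl⟩
        simp only [hp, if_true]
        have hdrop : List.drop (o :: old').length (c :: t) = t.drop ((o :: old').length - 1) := by
          simp
        rw [hdrop, ih _ _ (by simp at hl ⊢; omega), rep]
        simp [hp]
      · simp only [hp]
        rw [if_neg (by simp), ih t (c :: acc) (by simp at hl; omega), rep]
        simp [hp]

theorem replace_eq_rep (old s : List Char) (h : old ≠ []) :
    PySem.Chars.replace s old [' '] = rep old s := by
  rw [PySem.Chars.replace, if_neg (by simpa using h)]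
  simpa using rep_go old h s.length s [] le_rfl

theorem rep_of_not_infix (old s : List Char) (h : ¬ old <:+: s) : rep old s = s := by
  induction s with
  | nil => simp [rep]
  | cons c t ih =>
    rw [rep, if_neg (fun hp => h ((List.isPrefixOf_iff_prefix.mp hp).isInfix)), ih]
    intro hi; exact h (hi.trans (List.suffix_cons c t).isInfix)


theorem char_toNat_inj (a b : Char) (h : a.toNat = b.toNat) : a = b := by
  apply Char.ext; apply UInt32.toBitVec_inj.mp; apply BitVec.toNat_inj.mp; exact h

theorem char_eq_iff_toNat (a b : Char) : a = b ↔ a.toNat = b.toNat :=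
  ⟨fun h => by rw [h], char_toNat_inj a b⟩

theorem dom_isspace (c : Char) (h : pvDomChar c = true) : PySem.Chars.isspace c = isWS4 c := by
  simp only [pvDomChar, Bool.or_eq_true, Bool.and_eq_true, decide_eq_true_eq, beq_iff_eq] at h
  rw [Bool.eq_iff_iff]
  simp only [PySem.Chars.isspace, isWS4, Bool.or_eq_true, Bool.and_eq_true, decide_eq_true_eq,
    beq_iff_eq, char_eq_iff_toNat]
  have h32 : (' ' : Char).toNat = 32 := by decide
  have h9 : ('\t' : Char).toNat = 9 := by decide
  have h10 : ('\n' : Char).toNat = 10 := by decide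
  have h13 : ('\r' : Char).toNat = 13 := by decide
  rw [h32, h9, h10, h13]
  omega

theorem strip_empty (s : List Char) :
    (PySem.Chars.strip s = []) ↔ s.all PySem.Chars.isspace = true := by
  rw [PySem.Chars.strip, PySem.Chars.rstrip, PySem.Chars.lstrip]
  simp only [List.reverse_eq_nil_iff, List.dropWhile_eq_nil_iff, List.mem_reverse,
    List.all_eq_true]
  constructor
  · intro h c hc
    have hc2 : c ∈ s.takeWhile PySem.Chars.isspace ++ s.dropWhile PySem.Chars.isspace := by
      rw [List.takeWhile_append_dropWhile]; exact hc
    rcases List.mem_append.mp hc2 with h1 | h2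
    · exact List.mem_takeWhile_imp h1
    · exact h c h2
  · intro h c hc
    exact h c ((List.dropWhile_sublist _).subset hc)

theorem rep_nil (old : List Char) : rep old [] = [] := by rw [rep]

theorem rep_pass (o : Char) (old' : List Char) (c : Char) (t : List Char) (h : ¬ o = c) :
    rep (o :: old') (c :: t) = c :: rep (o :: old') t := by
  rw [rep, if_neg]
  simp [List.isPrefixOf, h]

theorem rep_consume (o : Char) (old' t : List Char) :
    rep (o :: old') (o :: (old' ++ t)) = ' ' :: rep (o :: old') t := by
  rw [rep, if_pos]
  · simp
  · exact List.isPrefixOf_iff_prefix.mpr (by simpa using (List.prefix_append old' t).cons o)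

theorem rep_head (old : List Char) (c : Char) (t : List Char) :
    (rep old (c :: t)).head? = some ' ' ∨ (rep old (c :: t)).head? = some c := by
  rw [rep]; split <;> simp

theorem rep_head_eq (old s : List Char) (d : Char) (v : List Char)
    (h : rep old s = d :: v) (hd : ¬ d = ' ') : s.head? = some d := by
  cases s with
  | nil => rw [rep_nil] at h; simp at h
  | cons c t =>
    rcases rep_head old c t with hh | hh <;> rw [h] at hh <;> simp at hh
    · exact absurd hh hd
    · subst hh; simp

theorem rep_oo (old s v : List Char) (h : rep old s = 'o' :: 'o' :: v) :
    ∃ w, s = 'o' :: 'o' :: w := by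
  cases s with
  | nil => rw [rep_nil] at h; simp at h
  | cons c t =>
    rw [rep] at h
    split at h
    · exact absurd (congrArg List.head? h) (by simp)
    · obtain ⟨rfl, h2⟩ : c = 'o' ∧ rep old t = 'o' :: v := by simpa using h
      cases t with
      | nil => rw [rep_nil] at h2; simp at h2
      | cons d t' =>
        rcases rep_head old d t' with hh | hh <;> rw [h2] at hh <;> simp at hh
        exact ⟨t', by rw [← hh]⟩

def fAll (s : List Char) : List Char :=
  rep ['m','a'] (rep ['w','o','o'] (rep ['y','e'] (rep ['a','y','a'] s)))

theorem prefix1 (a : Char) (X : List Char) (h : [a].isPrefixOf X = true) :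
    ∃ v, X = a :: v := by
  cases X with
  | nil => simp [List.isPrefixOf] at h
  | cons d Y =>
    have hd : a = d := by simpa [List.isPrefixOf] using h
    exact ⟨Y, by rw [hd]⟩

theorem prefix2 (a b : Char) (X : List Char) (h : (a :: b :: List.nil).isPrefixOf X = true) :
    ∃ v, X = a :: b :: v := by
  cases X with
  | nil => simp [List.isPrefixOf] at h
  | cons d Y =>
    cases Y with
    | nil => simp [List.isPrefixOf] at h
    | cons e Z =>
      have hd : a = d ∧ b = e := by simpa [List.isPrefixOf] using h
      exact ⟨Z, by rw [hd.1, hd.2]⟩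

theorem main_lemma : ∀ (fuel : Nat) (s : List Char), s.length ≤ fuel →
    (∀ c ∈ s, pvDomChar c = true) →
    (fAll s).all PySem.Chars.isspace = tokWSF fuel s := by
  intro fuel
  induction fuel with
  | zero =>
    intro s h _
    have hs : s = [] := by cases s <;> simp_all
    subst hs; simp [fAll, rep_nil, tokWSF]
  | succ fuel ih =>
    intro s hlen hdom
    cases s with
    | nil => simp [fAll, rep_nil, tokWSF]
    | cons c t =>
      simp only [List.length_cons] at hlen
      have hdt : ∀ x ∈ t, pvDomChar x = true := fun x hx => hdom x (by simp [hx])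
      rw [tokWSF]
      by_cases hA : ['a','y','a'].isPrefixOf (c :: t) = true
      · obtain ⟨r, hr⟩ := List.isPrefixOf_iff_prefix.mp hA
        obtain ⟨rfl, rfl⟩ : c = 'a' ∧ t = 'y' :: 'a' :: r := by
          have := hr.symm; simp at this; tauto
        have e : fAll ('a' :: 'y' :: 'a' :: r) = ' ' :: fAll r := by
          unfold fAll
          rw [show ('a' :: 'y' :: 'a' :: r : List Char) = 'a' :: (['y','a'] ++ r) from rfl,
            rep_consume, rep_pass 'y' _ _ _ (by decide), rep_pass 'w' _ _ _ (by decide),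
            rep_pass 'm' _ _ _ (by decide)]
        rw [if_pos (by simp [hA]), e]
        simp only [List.all_cons, List.drop_succ_cons, List.drop_zero]
        rw [ih r (by simp at hlen; omega) (fun x hx => hdom x (by simp [hx]))]
        simp [show PySem.Chars.isspace ' ' = true from by decide]
      · by_cases hW : ['w','o','o'].isPrefixOf (c :: t) = true
        · obtain ⟨r, hr⟩ := List.isPrefixOf_iff_prefix.mp hW
          obtain ⟨rfl, rfl⟩ : c = 'w' ∧ t = 'o' :: 'o' :: r := by
            have := hr.symm; simp at this; tauto
          have e : fAll ('w' :: 'o' :: 'o' :: r) = ' ' :: fAll r := by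
            unfold fAll
            rw [rep_pass 'a' _ _ _ (by decide), rep_pass 'a' _ _ _ (by decide),
              rep_pass 'a' _ _ _ (by decide), rep_pass 'y' _ _ _ (by decide),
              rep_pass 'y' _ _ _ (by decide), rep_pass 'y' _ _ _ (by decide),
              show ('w' :: 'o' :: 'o' :: rep ['y','e'] (rep ['a','y','a'] r) : List Char)
                = 'w' :: (['o','o'] ++ rep ['y','e'] (rep ['a','y','a'] r)) from rfl,
              rep_consume, rep_pass 'm' _ _ _ (by decide)]
          rw [if_pos (by simp [hW]), e]
          simp only [List.all_cons, List.drop_succ_cons, List.drop_zero]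
          rw [ih r (by simp at hlen; omega) (fun x hx => hdom x (by simp [hx]))]
          simp [show PySem.Chars.isspace ' ' = true from by decide]
        · rw [if_neg (by simp [hA, hW])]
          by_cases hY : ['y','e'].isPrefixOf (c :: t) = true
          · obtain ⟨r, hr⟩ := List.isPrefixOf_iff_prefix.mp hY
            obtain ⟨rfl, rfl⟩ : c = 'y' ∧ t = 'e' :: r := by
              have := hr.symm; simp at this; tauto
            have e : fAll ('y' :: 'e' :: r) = ' ' :: fAll r := by
              unfold fAll
              rw [rep_pass 'a' _ _ _ (by decide), rep_pass 'a' _ _ _ (by decide),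
                show ('y' :: 'e' :: rep ['a','y','a'] r : List Char)
                  = 'y' :: (['e'] ++ rep ['a','y','a'] r) from rfl,
                rep_consume, rep_pass 'w' _ _ _ (by decide), rep_pass 'm' _ _ _ (by decide)]
            rw [if_pos (by simp [hY]), e]
            simp only [List.all_cons, List.drop_succ_cons, List.drop_zero]
            rw [ih r (by simp at hlen; omega) (fun x hx => hdom x (by simp [hx]))]
            simp [show PySem.Chars.isspace ' ' = true from by decide]
          · by_cases hM : ['m','a'].isPrefixOf (c :: t) = true
            · obtain ⟨r, hr⟩ := List.isPrefixOf_iff_prefix.mp hM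
              obtain ⟨rfl, rfl⟩ : c = 'm' ∧ t = 'a' :: r := by
                have := hr.symm; simp at this; tauto
              rw [if_pos (by simp [hM])]
              simp only [List.drop_succ_cons, List.drop_zero]
              by_cases hA2 : ['a','y','a'].isPrefixOf ('a' :: r) = true
              · obtain ⟨r2, hr2⟩ := List.isPrefixOf_iff_prefix.mp hA2
                obtain ⟨rfl⟩ : r = 'y' :: 'a' :: r2 := by
                  have := hr2.symm; simp at this; tauto
                have e : fAll ('m' :: 'a' :: 'y' :: 'a' :: r2)
                    = 'm' :: ' ' :: rep ['m','a'] (rep ['w','o','o'] (rep ['y','e'] (rep ['a','y','a'] r2))) := by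
                  unfold fAll
                  rw [rep_pass 'a' _ _ _ (by decide),
                    show ('a' :: 'y' :: 'a' :: r2 : List Char) = 'a' :: (['y','a'] ++ r2) from rfl,
                    rep_consume, rep_pass 'y' _ _ _ (by decide), rep_pass 'y' _ _ _ (by decide),
                    rep_pass 'w' _ _ _ (by decide), rep_pass 'w' _ _ _ (by decide)]
                  rw [rep, if_neg (by simp [List.isPrefixOf]), rep_pass 'm' _ _ _ (by decide)]
                have hL : (fAll ('m' :: 'a' :: 'y' :: 'a' :: r2)).all PySem.Chars.isspace = false := by
                  rw [e]; simp [show PySem.Chars.isspace 'm' = false from by decide]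
                rw [hL]
                simp only [List.length_cons] at hlen
                cases fuel with
                | zero => omega
                | succ fuel2 =>
                  rw [tokWSF]
                  rw [if_neg (by simp [List.isPrefixOf]), if_neg (by simp [List.isPrefixOf]),
                    if_neg (by decide)]
              · have e : fAll ('m' :: 'a' :: r) = ' ' :: fAll r := by
                  unfold fAll
                  rw [rep_pass 'a' _ _ _ (by decide)]
                  rw [show rep ['a','y','a'] ('a' :: r) = 'a' :: rep ['a','y','a'] r from by
                    rw [rep, if_neg (by simpa using hA2)]]
                  rw [rep_pass 'y' _ _ _ (by decide), rep_pass 'y' _ _ _ (by decide),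
                    rep_pass 'w' _ _ _ (by decide), rep_pass 'w' _ _ _ (by decide),
                    show ('m' :: 'a' :: rep ['w','o','o'] (rep ['y','e'] (rep ['a','y','a'] r)) : List Char)
                      = 'm' :: (['a'] ++ rep ['w','o','o'] (rep ['y','e'] (rep ['a','y','a'] r))) from rfl,
                    rep_consume]
                rw [e]
                simp only [List.all_cons]
                rw [ih r (by simp at hlen; omega) (fun x hx => hdom x (by simp [hx]))]
                simp [show PySem.Chars.isspace ' ' = true from by decide]
            · rw [if_neg (by simp [hY, hM])]
              have hdc : pvDomChar c = true := hdom c (by simp)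
              by_cases hws : isWS4 c = true
              · have na : ¬ ('a' = c) := fun h => by subst h; exact absurd hws (by decide)
                have ny : ¬ ('y' = c) := fun h => by subst h; exact absurd hws (by decide)
                have nw : ¬ ('w' = c) := fun h => by subst h; exact absurd hws (by decide)
                have nm : ¬ ('m' = c) := fun h => by subst h; exact absurd hws (by decide)
                have e : fAll (c :: t) = c :: fAll t := by
                  unfold fAll
                  rw [rep_pass 'a' _ _ _ na, rep_pass 'y' _ _ _ ny, rep_pass 'w' _ _ _ nw,
                    rep_pass 'm' _ _ _ nm]
                rw [if_pos hws, e]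
                simp only [List.all_cons]
                rw [ih t (by omega) hdt, dom_isspace c hdc, hws]
                simp
              · rw [if_neg hws]
                have hsp : PySem.Chars.isspace c = false := by
                  rw [dom_isspace c hdc]; exact (Bool.not_eq_true _).mp hws
                have e : fAll (c :: t) = c :: fAll t := by
                  unfold fAll
                  by_cases hca : c = 'a'
                  · subst hca
                    rw [show rep ['a','y','a'] ('a' :: t) = 'a' :: rep ['a','y','a'] t from by
                      rw [rep, if_neg (by simpa using hA)]]
                    rw [rep_pass 'y' _ _ _ (by decide), rep_pass 'w' _ _ _ (by decide),
                      rep_pass 'm' _ _ _ (by decide)]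
                  by_cases hcy : c = 'y'
                  · subst hcy
                    rw [rep_pass 'a' _ _ _ (by decide)]
                    have hne : ¬ (['y','e'].isPrefixOf ('y' :: rep ['a','y','a'] t) = true) := by
                      intro hp
                      cases hX : rep ['a','y','a'] t with
                      | nil => rw [hX] at hp; simp [List.isPrefixOf] at hp
                      | cons d X' =>
                        rw [hX] at hp
                        have hd : 'e' = d := by simpa [List.isPrefixOf] using hp
                        subst hd
                        have ht := rep_head_eq _ _ _ _ hX (by decide)
                        obtain ⟨t3, rfl⟩ : ∃ t3, t = 'e' :: t3 := by cases t <;> simp_all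
                        exact hY (by simp [List.isPrefixOf])
                    rw [show rep ['y','e'] ('y' :: rep ['a','y','a'] t)
                        = 'y' :: rep ['y','e'] (rep ['a','y','a'] t) from by
                      rw [rep, if_neg (by simpa using hne)]]
                    rw [rep_pass 'w' _ _ _ (by decide), rep_pass 'm' _ _ _ (by decide)]
                  by_cases hcw : c = 'w'
                  · subst hcw
                    rw [rep_pass 'a' _ _ _ (by decide), rep_pass 'y' _ _ _ (by decide)]
                    have hne : ¬ (['w','o','o'].isPrefixOf
                        ('w' :: rep ['y','e'] (rep ['a','y','a'] t)) = true) := by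
                      intro hp
                      have hp2 : (['o','o'] : List Char).isPrefixOf
                          (rep ['y','e'] (rep ['a','y','a'] t)) = true := by
                        simpa [List.isPrefixOf] using hp
                      obtain ⟨v, hv⟩ := prefix2 'o' 'o' _ hp2
                      obtain ⟨w1, hw1⟩ := rep_oo _ _ _ hv
                      obtain ⟨w2, rfl⟩ := rep_oo _ _ _ hw1
                      exact hW (by simp [List.isPrefixOf])
                    rw [show rep ['w','o','o'] ('w' :: rep ['y','e'] (rep ['a','y','a'] t))
                        = 'w' :: rep ['w','o','o'] (rep ['y','e'] (rep ['a','y','a'] t)) from by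
                      rw [rep, if_neg (by simpa using hne)]]
                    rw [rep_pass 'm' _ _ _ (by decide)]
                  by_cases hcm : c = 'm'
                  · subst hcm
                    rw [rep_pass 'a' _ _ _ (by decide), rep_pass 'y' _ _ _ (by decide),
                      rep_pass 'w' _ _ _ (by decide)]
                    have hne : ¬ (['m','a'].isPrefixOf
                        ('m' :: rep ['w','o','o'] (rep ['y','e'] (rep ['a','y','a'] t))) = true) := by
                      intro hp
                      have hp2 : (['a'] : List Char).isPrefixOf
                          (rep ['w','o','o'] (rep ['y','e'] (rep ['a','y','a'] t))) = true := by
                        simpa [List.isPrefixOf] using hp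
                      obtain ⟨v, hv⟩ := prefix1 'a' _ hp2
                      have h1 := rep_head_eq _ _ _ _ hv (by decide)
                      obtain ⟨q, hq⟩ : ∃ q, rep ['y','e'] (rep ['a','y','a'] t) = 'a' :: q := by
                        cases hX : rep ['y','e'] (rep ['a','y','a'] t) with
                        | nil => rw [hX] at h1; simp at h1
                        | cons d X' => rw [hX] at h1; simp at h1; exact ⟨X', by rw [h1]⟩
                      have h2 := rep_head_eq _ _ _ _ hq (by decide)
                      obtain ⟨q2, hq2⟩ : ∃ q2, rep ['a','y','a'] t = 'a' :: q2 := by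
                        cases hX : rep ['a','y','a'] t with
                        | nil => rw [hX] at h2; simp at h2
                        | cons d X' => rw [hX] at h2; simp at h2; exact ⟨X', by rw [h2]⟩
                      have h3 := rep_head_eq _ _ _ _ hq2 (by decide)
                      obtain ⟨t3, rfl⟩ : ∃ t3, t = 'a' :: t3 := by cases t <;> simp_all
                      exact hM (by simp [List.isPrefixOf])
                    rw [show rep ['m','a'] ('m' :: rep ['w','o','o'] (rep ['y','e'] (rep ['a','y','a'] t)))
                        = 'm' :: rep ['m','a'] (rep ['w','o','o'] (rep ['y','e'] (rep ['a','y','a'] t))) from by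
                      rw [rep, if_neg (by simpa using hne)]]
                  · rw [rep_pass 'a' _ _ _ (fun h => hca h.symm), rep_pass 'y' _ _ _ (fun h => hcy h.symm),
                      rep_pass 'w' _ _ _ (fun h => hcw h.symm), rep_pass 'm' _ _ _ (fun h => hcm h.symm)]
                rw [e]
                simp [hsp]

theorem slice_tok (L : List Char) (i k : Nat) (p : List Char) (hk : p.length = k) :
    (PySem.List.slice L (some (i : Int)) (some ((i + k : Nat) : Int)) = p)
      ↔ (p.isPrefixOf (L.drop i) = true) := by
  rw [PySem.List.slice_natCast, show (i + k) - i = k from by omega,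
    List.isPrefixOf_iff_prefix, List.prefix_iff_eq_take, hk]
  exact ⟨fun h => h.symm, fun h => h.symm⟩

theorem slice3_mem (w : String) (i : Nat) :
    (PySem.Str.slice w (some (i : Int)) (some ((i + 3 : Nat) : Int)) ∈ ["aya", "woo"])
      ↔ ((['a','y','a'].isPrefixOf (w.toList.drop i)
          || ['w','o','o'].isPrefixOf (w.toList.drop i)) = true) := by
  rw [Bool.or_eq_true]
  simp only [List.mem_cons, List.not_mem_nil, or_false]
  apply or_congr
  · rw [← String.toList_inj, PySem.Str.toList_slice, PySem.Chars.slice_eq_listSlice,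
      show ("aya" : String).toList = ['a','y','a'] from by decide]
    exact slice_tok _ _ _ _ (by decide)
  · rw [← String.toList_inj, PySem.Str.toList_slice, PySem.Chars.slice_eq_listSlice,
      show ("woo" : String).toList = ['w','o','o'] from by decide]
    exact slice_tok _ _ _ _ (by decide)

theorem slice2_mem (w : String) (i : Nat) :
    (PySem.Str.slice w (some (i : Int)) (some ((i + 2 : Nat) : Int)) ∈ ["ye", "ma"])
      ↔ ((['y','e'].isPrefixOf (w.toList.drop i)
          || ['m','a'].isPrefixOf (w.toList.drop i)) = true) := by
  rw [Bool.or_eq_true]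
  simp only [List.mem_cons, List.not_mem_nil, or_false]
  apply or_congr
  · rw [← String.toList_inj, PySem.Str.toList_slice, PySem.Chars.slice_eq_listSlice,
      show ("ye" : String).toList = ['y','e'] from by decide]
    exact slice_tok _ _ _ _ (by decide)
  · rw [← String.toList_inj, PySem.Str.toList_slice, PySem.Chars.slice_eq_listSlice,
      show ("ma" : String).toList = ['m','a'] from by decide]
    exact slice_tok _ _ _ _ (by decide)

theorem speaksGo_eq_tokWSF (w : String) (hdom : ∀ c ∈ w.toList, pvDomChar c = true) :
    ∀ (fuel i : Nat), w.toList.length - i ≤ fuel →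
      speaksGo w w.toList.length i fuel = tokWSF fuel (w.toList.drop i) := by
  intro fuel
  induction fuel with
  | zero =>
    intro i h
    have hnil : w.toList.drop i = [] := List.drop_eq_nil_of_le (by omega)
    rw [speaksGo, tokWSF, hnil]
    rfl
  | succ fuel ih =>
    intro i hlen
    by_cases hin : i < w.toList.length
    · obtain ⟨c, t, hct⟩ : ∃ c t, w.toList.drop i = c :: t := by
        cases h : w.toList.drop i with
        | nil => exact absurd (List.drop_eq_nil_iff.mp h) (by omega)
        | cons c t => exact ⟨c, t, rfl⟩
      rw [speaksGo, if_pos hin, hct, tokWSF]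
      by_cases h3 : (['a','y','a'].isPrefixOf (c :: t) || ['w','o','o'].isPrefixOf (c :: t)) = true
      · rw [if_pos ((slice3_mem w i).mpr (by rw [hct]; exact h3)), if_pos h3,
          ih (i + 3) (by omega)]
        congr 1
        rw [show (t.drop 2 : List Char) = (c :: t).drop 3 from rfl, ← hct, List.drop_drop]
      · rw [if_neg (fun hm => h3 (by rw [← hct]; exact (slice3_mem w i).mp hm)), if_neg h3]
        by_cases h2 : (['y','e'].isPrefixOf (c :: t) || ['m','a'].isPrefixOf (c :: t)) = true
        · rw [if_pos ((slice2_mem w i).mpr (by rw [hct]; exact h2)), if_pos h2,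
            ih (i + 2) (by omega)]
          congr 1
          rw [show (t.drop 1 : List Char) = (c :: t).drop 2 from rfl, ← hct, List.drop_drop]
        · rw [if_neg (fun hm => h2 (by rw [← hct]; exact (slice2_mem w i).mp hm)), if_neg h2]
          have hgi : PySem.Str.pyGet? w (i : Int) = some c := by
            rw [PySem.Str.pyGet?_natCast, ← List.head?_drop, hct]
            rfl
          have hcw : c ∈ w.toList := by
            have : c ∈ w.toList.drop i := by rw [hct]; simp
            exact (List.drop_subset _ _) this
          rw [hgi]
          simp only [dom_isspace c (hdom c hcw)]
          by_cases hws : isWS4 c = true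
          · rw [if_pos hws, if_pos hws, ih (i + 1) (by omega)]
            congr 1
            rw [show (t : List Char) = (c :: t).drop 1 from rfl, ← hct, List.drop_drop]
          · rw [if_neg hws, if_neg hws]
    · rw [speaksGo, if_neg hin, List.drop_eq_nil_of_le (by omega), tokWSF]

theorem step_toList (sp w : String) (h : sp.toList ≠ []) :
    (if PySem.Str.isIn sp w then PySem.Str.replace w sp " " else w).toList
      = rep sp.toList w.toList := by
  by_cases hin : PySem.Str.isIn sp w = true
  · rw [if_pos hin, PySem.Str.toList_replace,
      show (" " : String).toList = [' '] from by decide]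
    exact replace_eq_rep _ _ h
  · rw [if_neg hin]
    have hni : ¬ sp.toList <:+: w.toList := by
      rw [PySem.Str.isIn_eq] at hin
      exact (PySem.Chars.isIn_eq_false_iff _ _).mp (by simpa using hin)
    exact (rep_of_not_infix _ _ hni).symm

theorem aWord_eq (w : String) (hd : pvDomStr w = true) :
    (PySem.Str.strip (["aya","ye","woo","ma"].foldl (fun word speakable =>
        if PySem.Str.isIn speakable word then PySem.Str.replace word speakable " " else word) w)
      == "") = tokWS w.toList := by
  have hfold : (["aya","ye","woo","ma"].foldl (fun word speakable =>
      if PySem.Str.isIn speakable word then PySem.Str.replace word speakable " " else word) w).toList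
      = fAll w.toList := by
    simp only [List.foldl_cons, List.foldl_nil]
    rw [fAll, step_toList "ma" _ (by decide), step_toList "woo" _ (by decide),
      step_toList "ye" _ (by decide), step_toList "aya" _ (by decide)]
    rfl
  have hdom : ∀ c ∈ w.toList, pvDomChar c = true := by
    rw [pvDomStr] at hd; simpa using hd
  rw [Bool.eq_iff_iff, beq_iff_eq, ← String.toList_inj, PySem.Str.toList_strip, hfold,
    show ("" : String).toList = [] from by decide, strip_empty,
    main_lemma w.toList.length w.toList le_rfl hdom, tokWS]

theorem bWord_eq (w : String) (hd : pvDomStr w = true) :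
    speaksGo w (PySem.Str.len w).toNat 0 (PySem.Str.len w).toNat = tokWS w.toList := by
  have hdom : ∀ c ∈ w.toList, pvDomChar c = true := by
    rw [pvDomStr] at hd; simpa using hd
  have hn : (PySem.Str.len w).toNat = w.toList.length := by rw [PySem.Str.len_eq]; simp
  rw [hn, speaksGo_eq_tokWSF w hdom w.toList.length 0 (by omega), List.drop_zero, tokWS]

theorem solution_to_countP (babbling : List String) :
    solution babbling = 0 + ((babbling.countP (fun word =>
      PySem.Str.strip (["aya","ye","woo","ma"].foldl (fun word speakable =>
        if PySem.Str.isIn speakable word then PySem.Str.replace word speakable " " else word) word)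
      == "")) : Int) := by
  rw [solution]
  exact PySem.List.foldl_if_add_one _ _ _

theorem solution_alt_to_countP (babbling : List String) :
    solution_alt babbling = 0 + ((babbling.countP (fun word =>
      speaksGo word (PySem.Str.len word).toNat 0 (PySem.Str.len word).toNat)) : Int) := by
  rw [solution_alt]
  exact PySem.List.foldl_if_add_one _ _ _

-- ===== VERDICT (by name: the statement is the Claim_ definition above) =====
theorem solution_spec : Claim_equal_solution := by
  intro babbling hdom
  have hdom2 : ∀ w ∈ babbling, pvDomStr w = true := by
    rw [Dom_solution] at hdom; simpa using hdom
  rw [Spec_solution, solution_to_countP, solution_alt_to_countP]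
  exact congrArg (fun n : Nat => (0 : Int) + (n : Int)) (List.countP_congr (fun w hw => by
    rw [aWord_eq w (hdom2 w hw), bWord_eq w (hdom2 w hw)]))
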